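-- pv_equiv track=rewrite | github.com/wodm15/programmers | 프로그래머스/1/138477. 명예의 전당 （1）/명예의 전당 （1）.py | solution
-- ===== SOURCE A (Python) =====
-- def solution(k, score):
--     answer = []
--     result=[]
--     for i in range(len(score)):
--         answer.append(score[i])
--         answer.sort()
--         if (len(answer) <= k):
--             result.append(answer[0])
--         elif (len(answer) > k):
--             answer.pop(0)
--             result.append(answer[0])
--     return result
-- ===== SOURCE B (Python) =====
-- def solution(k, score):
--     # Incremental: keep the whole prefix sorted via binary-search insertion
--     # (no per-day re-sort, no popping); the day's answer is read directly:
--     # the minimum while fewer than k scores are in, else the k-th largest s[-k].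
--     s = []
--     result = []
--     for x in score:
--         lo, hi = 0, len(s)
--         while lo < hi:
--             mid = (lo + hi) // 2
--             if s[mid] <= x:
--                 lo = mid + 1
--             else:
--                 hi = mid
--         s.insert(lo, x)
--         result.append(s[0] if len(s) <= k else s[-k])
--     return result
-- ===== Notes on version B (the rewrite author's own statement) =====
-- stated objective: faster
-- what changed: A maintains a mutable top-k window by appending, fully re-sorting and popping the front each day; B instead keeps the whole prefix sorted with one binary search plus one insertion per day and reads the day's answer directly off it (s[0] while fewer than k scores, else s[-k], the k-th largest).
import Mathlib
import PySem

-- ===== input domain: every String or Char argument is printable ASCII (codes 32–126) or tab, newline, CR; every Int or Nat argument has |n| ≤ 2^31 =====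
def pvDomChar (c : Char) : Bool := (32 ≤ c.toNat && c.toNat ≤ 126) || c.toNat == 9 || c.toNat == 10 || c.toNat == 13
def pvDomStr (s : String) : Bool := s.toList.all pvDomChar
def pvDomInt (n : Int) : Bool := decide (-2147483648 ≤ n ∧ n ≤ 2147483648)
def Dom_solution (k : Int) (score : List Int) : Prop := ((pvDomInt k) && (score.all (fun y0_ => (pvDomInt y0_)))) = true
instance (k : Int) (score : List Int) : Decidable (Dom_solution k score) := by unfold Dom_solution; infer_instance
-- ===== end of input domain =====

-- B replaces A's mutable top-k window (append / re-sort / pop-min each day) by one sorted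
-- prefix maintained with binary-search insertion, reading the answer off it directly;
-- equal return values are proved on Pre_ (k ≥ 1, or empty score).

-- ===== PORT A =====
def solution (k : Int) (score : List Int) : List Int :=
  (score.foldl (fun (st : List Int × List Int) x =>
      let answer := PySem.List.sorted (st.1 ++ [x]) (fun v => v) false
      if (answer.length : Int) ≤ k then
        (answer, st.2 ++ [(PySem.List.pyGet? answer 0).getD 0])
      else
        -- answer.pop(0); result.append(answer[0])
        let answer' := answer.drop 1
        (answer', st.2 ++ [(PySem.List.pyGet? answer' 0).getD 0]))
    ([], [])).2

-- ===== PORT B =====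
-- the `while lo < hi` binary-search loop of Source B (s[mid] is in range whenever hi ≤ len s)
def bsearch (s : List Int) (x : Int) (lo hi : Nat) : Nat :=
  if _h : lo < hi then
    let mid := (lo + hi) / 2
    if PySem.List.pyGetD s (mid : Int) 0 ≤ x then bsearch s x (mid + 1) hi
    else bsearch s x lo mid
  else lo
termination_by hi - lo
decreasing_by
  · omega
  · have : (lo + hi) / 2 < hi := by omega
    omega

def solution_alt (k : Int) (score : List Int) : List Int :=
  (score.foldl (fun (st : List Int × List Int) x =>
      let lo := bsearch st.1 x 0 st.1.length
      let s' := PySem.List.insert st.1 (lo : Int) x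
      (s', st.2 ++ [if (s'.length : Int) ≤ k then (PySem.List.pyGet? s' 0).getD 0
                    else (PySem.List.pyGet? s' (-k)).getD 0]))
    ([], [])).2

-- ===== PRECONDITION & SPEC =====
-- Pre_ excludes exactly the inputs where A raises IndexError: k < 1 with a nonempty score
-- (the running list is emptied by pop and answer[0] fails on day one).
def Pre_solution (k : Int) (score : List Int) : Prop := 1 ≤ k ∨ score = []
instance (k : Int) (score : List Int) : Decidable (Pre_solution k score) := by
  unfold Pre_solution; infer_instance

def pvWitness_solution : Int × List Int := (3, [10, 100, 20, 150, 1, 100, 200])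

def Spec_solution (k : Int) (score : List Int) (out : List Int) : Prop := out = solution_alt k score
instance (k : Int) (score : List Int) (out : List Int) : Decidable (Spec_solution k score out) := by
  unfold Spec_solution; infer_instance

-- ===== CLAIM (what is proved, stated in full; the proofs are below) =====
def Claim_equal_solution : Prop := ∀ (k : Int) (score : List Int), Dom_solution k score → Pre_solution k score → Spec_solution k score (solution k score)

-- ===== LEMMAS AND PROOFS =====

-- `sorted` with the identity key, the only form both ports use.
def spI (l : List Int) : List Int := PySem.List.sorted l (fun v => v) false

-- A's loop state after a prefix p: the running list is the top-min(|p|,K) block of the sorted prefix.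
def ansA (K : Nat) (p : List Int) : List Int := (spI p).drop (p.length - K)

lemma spI_perm (l : List Int) : (spI l).Perm l := PySem.List.sorted_perm l (fun v => v) false

lemma spI_pairwise (l : List Int) : (spI l).Pairwise (· ≤ ·) :=
  PySem.List.sorted_pairwise l (fun v => v)

lemma spI_length (l : List Int) : (spI l).length = l.length := (spI_perm l).length_eq

lemma spI_congr_perm {l l' : List Int} (h : l.Perm l') : spI l = spI l' :=
  PySem.List.sorted_eq_sorted_of_perm l l' (fun v => v) (fun _ _ h => h) h

-- sorting a sorted list with one element appended = ordered insertion
lemma spI_sorted_append (s : List Int) (x : Int) (hs : s.Pairwise (· ≤ ·)) :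
    spI (s ++ [x]) = List.orderedInsert (· ≤ ·) x s := by
  apply PySem.List.sorted_id_eq_of_perm_of_pairwise
  · exact (List.perm_orderedInsert _ x s).trans
      (by simpa using (List.perm_append_comm (l₁ := [x]) (l₂ := s)))
  · exact hs.orderedInsert x s

lemma orderedInsert_of_forall_le (x : Int) (l : List Int) (h : ∀ y ∈ l, x ≤ y) :
    List.orderedInsert (· ≤ ·) x l = x :: l := by
  cases l with
  | nil => rfl
  | cons b t => simp [List.orderedInsert_cons, h b (by simp)]

lemma length_orderedInsert' (x : Int) (l : List Int) :
    (List.orderedInsert (· ≤ ·) x l).length = l.length + 1 :=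
  (List.perm_orderedInsert _ x l).length_eq

-- the key commutation: dropping d+1 after inserting into s = dropping 1 after inserting into s.drop d
lemma drop_orderedInsert (x : Int) :
    ∀ (d : Nat) (s : List Int), s.Pairwise (· ≤ ·) →
      (List.orderedInsert (· ≤ ·) x s).drop (d + 1) =
        (List.orderedInsert (· ≤ ·) x (s.drop d)).drop 1 := by
  intro d
  induction d with
  | zero => intro s _; rfl
  | succ d ih =>
    intro s hs
    cases s with
    | nil => simp
    | cons a t =>
      by_cases hxa : x ≤ a
      · have ht : ∀ y ∈ t.drop d, x ≤ y := by
          intro y hy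
          exact le_trans hxa (List.rel_of_pairwise_cons hs (List.mem_of_mem_drop hy))
        rw [List.orderedInsert_cons, if_pos hxa,
          show (a :: t).drop (d + 1) = t.drop d from rfl,
          orderedInsert_of_forall_le x (t.drop d) ht]
        simp [List.drop_succ_cons]
      · rw [List.orderedInsert_cons, if_neg hxa]
        exact ih t hs.of_cons

-- one day's appended value, common to both loop characterisations
def outB (k : Int) (score : List Int) (i : Nat) : Int :=
  if ((i : Int) + 1 ≤ k) then (PySem.List.pyGet? (spI (score.take (i + 1))) 0).getD 0
  else (PySem.List.pyGet? (spI (score.take (i + 1))) (-k)).getD 0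

def resB (k : Int) (score : List Int) : List Int := (List.range score.length).map (outB k score)

lemma resB_append (k : Int) (p : List Int) (x : Int) :
    resB k (p ++ [x]) = resB k p ++ [outB k (p ++ [x]) p.length] := by
  unfold resB
  rw [List.length_append, List.length_singleton, List.range_succ, List.map_append]
  congr 1
  apply List.map_congr_left
  intro i hi
  have hi' : i < p.length := List.mem_range.mp hi
  unfold outB
  rw [List.take_append_of_le_length (by omega)]

-- the loop body of A
def stepA (k : Int) (st : List Int × List Int) (x : Int) : List Int × List Int :=
  if ((spI (st.1 ++ [x])).length : Int) ≤ k then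
    (spI (st.1 ++ [x]), st.2 ++ [(PySem.List.pyGet? (spI (st.1 ++ [x])) 0).getD 0])
  else
    ((spI (st.1 ++ [x])).drop 1,
      st.2 ++ [(PySem.List.pyGet? ((spI (st.1 ++ [x])).drop 1) 0).getD 0])

lemma solution_eq_foldl (k : Int) (score : List Int) :
    solution k score = (score.foldl (stepA k) ([], [])).2 := rfl

lemma stepA_char (k : Int) (hk : 1 ≤ k) (p : List Int) (x : Int) :
    stepA k (ansA k.toNat p, resB k p) x
      = (ansA k.toNat (p ++ [x]), resB k (p ++ [x])) := by
  have hkK : ((k.toNat : Int)) = k := Int.toNat_of_nonneg (by omega)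
  have htake : (p ++ [x]).take (p.length + 1) = p ++ [x] :=
    List.take_of_length_le (by simp)
  have hperm : (spI p ++ [x]).Perm (p ++ [x]) := (spI_perm p).append_right [x]
  rw [resB_append]
  by_cases hc : p.length + 1 ≤ k.toNat
  · -- still at most k scores: the running list is the whole sorted prefix
    have hA : ansA k.toNat p = spI p := by
      unfold ansA
      rw [show p.length - k.toNat = 0 by omega, List.drop_zero]
    have hans : spI (ansA k.toNat p ++ [x]) = spI (p ++ [x]) := by
      rw [hA]; exact spI_congr_perm hperm
    simp only [stepA, hans]
    have hlen : ((spI (p ++ [x])).length : Int) = (p.length : Int) + 1 := by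
      rw [spI_length]; simp
    rw [if_pos (by rw [hlen]; omega)]
    simp only [Prod.mk.injEq]
    refine ⟨?_, ?_⟩
    · unfold ansA
      rw [show (p ++ [x]).length - k.toNat = 0 by simp; omega, List.drop_zero]
    · simp only [outB, htake]
      rw [if_pos (by omega)]
  · -- more than k scores: pop the minimum
    have hK1 : 1 ≤ k.toNat := by omega
    have hKn : k.toNat ≤ p.length := by omega
    have hpw : (spI p).Pairwise (· ≤ ·) := spI_pairwise p
    have hdpw : ((spI p).drop (p.length - k.toNat)).Pairwise (· ≤ ·) :=
      List.Pairwise.sublist (List.drop_sublist _ _) hpw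
    have hans : spI (ansA k.toNat p ++ [x])
        = List.orderedInsert (· ≤ ·) x ((spI p).drop (p.length - k.toNat)) := by
      unfold ansA
      exact spI_sorted_append _ x hdpw
    have hq : spI (p ++ [x]) = List.orderedInsert (· ≤ ·) x (spI p) := by
      rw [← spI_congr_perm hperm]
      exact spI_sorted_append _ x hpw
    have hlen : (spI (ansA k.toNat p ++ [x])).length = k.toNat + 1 := by
      rw [hans, length_orderedInsert', List.length_drop, spI_length]
      omega
    simp only [stepA]
    rw [if_neg (by rw [hlen]; omega)]
    have hdrop : (spI (ansA k.toNat p ++ [x])).drop 1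
        = (spI (p ++ [x])).drop (p.length + 1 - k.toNat) := by
      rw [hans, hq, show p.length + 1 - k.toNat = (p.length - k.toNat) + 1 by omega]
      exact (drop_orderedInsert x (p.length - k.toNat) (spI p) hpw).symm
    simp only [Prod.mk.injEq]
    refine ⟨?_, ?_⟩
    · rw [hdrop]; unfold ansA; simp
    · congr 1
      simp only [outB, htake]
      rw [if_neg (by omega)]
      congr 1
      rw [hdrop]
      rw [PySem.List.pyGet?_zero, List.getElem?_drop]
      have := PySem.List.pyGet?_neg_natCast (xs := spI (p ++ [x])) (k := k.toNat)
        (by omega) (by rw [spI_length]; simp; omega)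
      rw [hkK] at this
      rw [this, spI_length]
      simp

lemma foldA_char (k : Int) (hk : 1 ≤ k) (score : List Int) :
    score.foldl (stepA k) ([], []) = (ansA k.toNat score, resB k score) := by
  induction score using List.reverseRecOn with
  | nil =>
    have h0 : spI [] = [] := (PySem.List.sorted_eq_nil_iff _ _ _).mpr rfl
    simp [ansA, resB, h0]
  | append_singleton p x ih =>
    rw [List.foldl_append, ih, List.foldl_cons, List.foldl_nil, stepA_char k hk]

-- ---- B side ----

-- binary-search invariant: bsearch returns a split point of the sorted list around x
lemma bsearch_spec (s : List Int) (x : Int) (hs : s.Pairwise (· ≤ ·)) :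
    ∀ (fuel lo hi : Nat), hi - lo ≤ fuel → lo ≤ hi → hi ≤ s.length →
      (∀ j (hj : j < s.length), j < lo → s[j] ≤ x) →
      (∀ j (hj : j < s.length), hi ≤ j → x < s[j]) →
      bsearch s x lo hi ≤ hi ∧
      (∀ j (hj : j < s.length), j < bsearch s x lo hi → s[j] ≤ x) ∧
      (∀ j (hj : j < s.length), bsearch s x lo hi ≤ j → x < s[j]) := by
  have hmono := (List.pairwise_iff_getElem.mp hs)
  intro fuel
  induction fuel with
  | zero =>
    intro lo hi hfuel hlh hhl hlow hhigh
    have : lo = hi := by omega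
    subst this
    rw [bsearch, dif_neg (by omega)]
    exact ⟨le_refl _, hlow, hhigh⟩
  | succ fuel ih =>
    intro lo hi hfuel hlh hhl hlow hhigh
    rw [bsearch]
    by_cases hlt : lo < hi
    · rw [dif_pos hlt]
      have hmid1 : lo ≤ (lo + hi) / 2 := by omega
      have hmid2 : (lo + hi) / 2 < hi := by omega
      have hmidlen : (lo + hi) / 2 < s.length := by omega
      have hsmid : PySem.List.pyGetD s (((lo + hi) / 2 : Nat) : Int) 0 = s[(lo + hi) / 2] := by
        rw [PySem.List.pyGetD_natCast, List.getD_eq_getElem?_getD, List.getElem?_eq_getElem hmidlen]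
        rfl
      by_cases hcmp : s[(lo + hi) / 2] ≤ x
      · rw [if_pos (by rw [hsmid]; exact hcmp)]
        refine ih ((lo + hi) / 2 + 1) hi (by omega) (by omega) hhl ?_ hhigh
        intro j hj hjlt
        rcases lt_or_ge j lo with h | h
        · exact hlow j hj h
        · rcases eq_or_lt_of_le (Nat.lt_succ_iff.mp hjlt) with h2 | h2
          · subst h2; exact hcmp
          · exact le_trans (hmono j ((lo + hi) / 2) hj hmidlen h2) hcmp
      · rw [if_neg (by rw [hsmid]; exact hcmp)]
        have := ih lo ((lo + hi) / 2) (by omega) (by omega) (by omega) hlow ?_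
        · exact ⟨le_trans this.1 (le_of_lt hmid2), this.2.1, this.2.2⟩
        · intro j hj hjge
          rcases eq_or_lt_of_le hjge with h2 | h2
          · subst h2; exact lt_of_not_ge hcmp
          · exact lt_of_lt_of_le (lt_of_not_ge hcmp) (hmono _ j hmidlen hj h2)
    · rw [dif_neg hlt]
      have : lo = hi := by omega
      subst this
      exact ⟨le_refl _, hlow, hhigh⟩

-- inserting x at the bisect-right point of the sorted prefix gives the sorted extended prefix
lemma insert_bsearch_eq (p : List Int) (x : Int) :
    PySem.List.insert (spI p) ((bsearch (spI p) x 0 (spI p).length : Nat) : Int) x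
      = spI (p ++ [x]) := by
  have hpw : (spI p).Pairwise (· ≤ ·) := spI_pairwise p
  obtain ⟨hle, hlow, hhigh⟩ := bsearch_spec (spI p) x hpw (spI p).length 0 (spI p).length
    (by omega) (by omega) (le_refl _) (by omega) (by omega)
  set r := bsearch (spI p) x 0 (spI p).length with hr
  rw [PySem.List.insert_natCast _ _ _ hle]
  symm
  apply PySem.List.sorted_id_eq_of_perm_of_pairwise
  · refine (List.perm_middle).trans ?_
    rw [List.take_append_drop]
    exact ((spI_perm p).cons x).trans
      (by simpa using (List.perm_append_comm (l₁ := [x]) (l₂ := p)))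
  · rw [List.pairwise_append]
    refine ⟨List.Pairwise.sublist (List.take_sublist _ _) hpw, ?_, ?_⟩
    · rw [List.pairwise_cons]
      refine ⟨?_, List.Pairwise.sublist (List.drop_sublist _ _) hpw⟩
      intro y hy
      obtain ⟨j, hj, rfl⟩ := List.mem_drop_iff_getElem.mp hy
      exact le_of_lt (hhigh (r + j) (by omega) (by omega))
    · intro a ha b hb
      obtain ⟨i, hilt, rfl⟩ := List.mem_take_iff_getElem.mp ha
      have hax : (spI p)[i]'(by omega) ≤ x := hlow i (by omega) (by omega)
      rcases List.mem_cons.mp hb with rfl | hb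
      · exact hax
      · obtain ⟨j, hj, rfl⟩ := List.mem_drop_iff_getElem.mp hb
        exact le_trans hax (le_of_lt (hhigh (r + j) (by omega) (by omega)))

-- the loop body of B
def stepB (k : Int) (st : List Int × List Int) (x : Int) : List Int × List Int :=
  let lo := bsearch st.1 x 0 st.1.length
  let s' := PySem.List.insert st.1 (lo : Int) x
  (s', st.2 ++ [if (s'.length : Int) ≤ k then (PySem.List.pyGet? s' 0).getD 0
                else (PySem.List.pyGet? s' (-k)).getD 0])

lemma solution_alt_eq_foldl (k : Int) (score : List Int) :
    solution_alt k score = (score.foldl (stepB k) ([], [])).2 := rfl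

lemma stepB_char (k : Int) (p : List Int) (x : Int) :
    stepB k (spI p, resB k p) x = (spI (p ++ [x]), resB k (p ++ [x])) := by
  have htake : (p ++ [x]).take (p.length + 1) = p ++ [x] :=
    List.take_of_length_le (by simp)
  have hins := insert_bsearch_eq p x
  have hlen : (spI (p ++ [x])).length = p.length + 1 := by rw [spI_length]; simp
  rw [resB_append]
  simp only [stepB, hins, Prod.mk.injEq]
  refine ⟨trivial, ?_⟩
  congr 1
  simp only [outB, htake, hlen]
  push_cast
  rfl

lemma foldB_char (k : Int) (score : List Int) :
    score.foldl (stepB k) ([], []) = (spI score, resB k score) := by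
  induction score using List.reverseRecOn with
  | nil =>
    have h0 : spI [] = [] := (PySem.List.sorted_eq_nil_iff _ _ _).mpr rfl
    simp [resB, h0]
  | append_singleton p x ih =>
    rw [List.foldl_append, ih, List.foldl_cons, List.foldl_nil, stepB_char k]

-- ===== VERDICT (by name: the statement is the Claim_ definition above) =====
theorem solution_spec : Claim_equal_solution := by
  intro k score _ hpre
  unfold Spec_solution
  rcases hpre with hk | rfl
  · rw [solution_eq_foldl, foldA_char k hk, solution_alt_eq_foldl, foldB_char k]
  · rfl
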